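-- pv_equiv track=rewrite | github.com/Pythonoob95/Dissertation_Final | main_new.py | _choices_from_input
-- ===== SOURCE A (Python) =====
-- def _choices_from_input(choice_str: str) -> set[str]:
--     tokens = []
--     for part in choice_str.replace(";", ",").split(","):
--         part = part.strip()
--         if not part:
--             continue
--         tokens.extend(p.strip() for p in part.split() if p.strip())
--     return set(tokens)
-- ===== SOURCE B (Python) =====
-- def _choices_from_input(choice_str: str) -> set[str]:
--     # Normalize every delimiter to a space, then tokenize in one pass:
--     # split() with no arguments already collapses runs and drops empties.
--     return set(choice_str.replace(";", " ").replace(",", " ").split())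
-- ===== Notes on version B (the rewrite author's own statement) =====
-- stated objective: simpler
-- what changed: Replaces the split-on-comma loop with nested whitespace splitting, stripping and empty-part guards by normalizing both delimiter characters to spaces and doing one argument-less split() whose empty-token dropping subsumes all the guards.
import Mathlib
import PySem

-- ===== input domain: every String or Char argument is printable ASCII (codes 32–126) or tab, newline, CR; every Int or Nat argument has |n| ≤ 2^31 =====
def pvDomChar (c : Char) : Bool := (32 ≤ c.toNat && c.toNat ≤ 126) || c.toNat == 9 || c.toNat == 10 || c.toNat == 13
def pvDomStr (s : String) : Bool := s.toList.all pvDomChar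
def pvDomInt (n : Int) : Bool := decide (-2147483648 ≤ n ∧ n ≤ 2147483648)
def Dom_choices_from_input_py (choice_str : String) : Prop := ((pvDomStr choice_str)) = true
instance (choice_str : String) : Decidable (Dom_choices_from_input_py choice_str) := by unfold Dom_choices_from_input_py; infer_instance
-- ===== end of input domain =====

-- B replaces A's comma-split loop with nested stripping/filtering by one
-- delimiter-normalizing pass and a single whitespace split (objective: simpler).
-- String operations are ported at the PySem.Chars level on .toList (the
-- PySem.Str wrappers are exactly these functions on .toList).

-- ===== PORT A =====
def choices_from_input_py (choice_str : String) : List String :=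
  let tokens :=
    (PySem.Chars.splitOn (PySem.Chars.replace choice_str.toList [';'] [',']) [',']).foldl
      (fun tokens part =>
        let part := PySem.Chars.strip part
        if part.isEmpty then tokens
        else tokens ++ ((PySem.Chars.split₀ part).filter
              (fun p => !(PySem.Chars.strip p).isEmpty)).map PySem.Chars.strip)
      []
  PySem.Set.ofList (tokens.map String.ofList)

-- ===== PORT B =====
def choices_from_input_py_alt (choice_str : String) : List String :=
  PySem.Set.ofList
    ((PySem.Chars.split₀
        (PySem.Chars.replace (PySem.Chars.replace choice_str.toList [';'] [' ']) [','] [' '])).map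
      String.ofList)

-- ===== PRECONDITION & SPEC =====
def Spec_choices_from_input_py (choice_str : String) (out : List String) : Prop := out = choices_from_input_py_alt choice_str
instance (choice_str : String) (out : List String) : Decidable (Spec_choices_from_input_py choice_str out) := by unfold Spec_choices_from_input_py; infer_instance

-- ===== CLAIM (what is proved, stated in full; the proofs are below) =====
def Claim_equal_choices_from_input_py : Prop := ∀ (choice_str : String), Dom_choices_from_input_py choice_str → Spec_choices_from_input_py choice_str (choices_from_input_py choice_str)

-- ===== LEMMAS AND PROOFS =====

-- WS p l = the nonempty maximal runs of non-delimiter (¬p) characters of l.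
def WS (p : Char → Bool) (l : List Char) : List (List Char) :=
  (List.splitOnP p l).filter (fun w => !w.isEmpty)

theorem modifyHead_id' {α : Type} (l : List α) : List.modifyHead (fun x => x) l = l := by
  cases l <;> simp

-- split₀'s worker, characterised by splitOnP.
theorem split0_go_eq (s cur : List Char) (acc : List (List Char)) :
    PySem.Chars.split₀.go s cur acc =
      acc.reverse ++
        ((List.splitOnP PySem.Chars.isspace s).modifyHead (cur.reverse ++ ·)).filter
          (fun w => !w.isEmpty) := by
  induction s generalizing cur acc with
  | nil =>
      by_cases h : cur.isEmpty
      · have hcur : cur = [] := List.isEmpty_iff.mp h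
        subst hcur
        simp [PySem.Chars.split₀.go, List.splitOnP_nil, List.filter]
      · simp [PySem.Chars.split₀.go, h, List.splitOnP_nil, List.filter, List.isEmpty_reverse]
  | cons c rest ih =>
      by_cases hc : PySem.Chars.isspace c
      · by_cases h : cur.isEmpty
        · have hcur : cur = [] := List.isEmpty_iff.mp h
          subst hcur
          simp [PySem.Chars.split₀.go, hc, ih, List.splitOnP_cons, modifyHead_id']
        · simp [PySem.Chars.split₀.go, hc, h, ih, List.splitOnP_cons, List.isEmpty_reverse,
            modifyHead_id']
      · obtain ⟨h0, r0, hsplit⟩ :=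
          List.exists_cons_of_ne_nil (List.splitOnP_ne_nil PySem.Chars.isspace rest)
        simp [PySem.Chars.split₀.go, hc, ih, List.splitOnP_cons, hsplit, List.modifyHead_cons,
          Function.comp, List.reverse_cons, List.append_assoc]

theorem split0_eq_WS (l : List Char) :
    PySem.Chars.split₀ l = WS PySem.Chars.isspace l := by
  have h := split0_go_eq l [] []
  simpa [PySem.Chars.split₀, WS, modifyHead_id'] using h

-- splitOn's worker for a one-character separator, characterised by splitOnP.
theorem splitOn_go_eq (a : Char) (fuel : Nat) :
    ∀ (l cur : List Char) (acc : List (List Char)), l.length ≤ fuel →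
      PySem.Chars.splitOn.go [a] fuel l cur acc =
        acc.reverse ++ (List.splitOnP (· == a) l).modifyHead (cur.reverse ++ ·) := by
  induction fuel with
  | zero =>
      intro l cur acc hlen
      have hl : l = [] := List.eq_nil_of_length_eq_zero (Nat.le_zero.mp hlen)
      subst hl
      simp [PySem.Chars.splitOn.go, List.splitOnP_nil]
  | succ fuel ih =>
      intro l cur acc hlen
      cases l with
      | nil => simp [PySem.Chars.splitOn.go, List.splitOnP_nil]
      | cons c rest =>
          have hlen' : rest.length ≤ fuel := by
            simpa [Nat.succ_le_succ_iff] using hlen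
          by_cases hac : c = a
          · subst hac
            have hpre : List.isPrefixOf [c] (c :: rest) = true := by simp [List.isPrefixOf]
            simp only [PySem.Chars.splitOn.go, hpre, if_pos]
            rw [ih _ _ _ (by simpa using hlen')]
            simp [List.splitOnP_cons, modifyHead_id']
          · have hpre : List.isPrefixOf [a] (c :: rest) = false := by
              simp [List.isPrefixOf]
              exact fun h => (hac h.symm).elim
            obtain ⟨h0, r0, hsplit⟩ := List.exists_cons_of_ne_nil (List.splitOnP_ne_nil (· == a) rest)
            simp only [PySem.Chars.splitOn.go, hpre, Bool.false_eq_true, if_neg]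
            rw [ih _ _ _ hlen']
            simp [List.splitOnP_cons, hac, hsplit, List.modifyHead_cons, List.reverse_cons,
              List.append_assoc]

theorem splitOn_single (l : List Char) (a : Char) :
    PySem.Chars.splitOn l [a] = List.splitOnP (· == a) l := by
  have h := splitOn_go_eq a (l.length + 1) l [] [] (by omega)
  simpa [PySem.Chars.splitOn, modifyHead_id'] using h

-- replace with one-character old/new is a character map.
theorem replace_go_single (a b : Char) (fuel : Nat) :
    ∀ (l acc : List Char), l.length ≤ fuel →
      PySem.Chars.replace.go [a] [b] fuel l acc =
        acc.reverse ++ l.map (fun c => if c == a then b else c) := by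
  induction fuel with
  | zero =>
      intro l acc hlen
      have hl : l = [] := List.eq_nil_of_length_eq_zero (Nat.le_zero.mp hlen)
      subst hl
      simp [PySem.Chars.replace.go]
  | succ fuel ih =>
      intro l acc hlen
      cases l with
      | nil => simp [PySem.Chars.replace.go]
      | cons c rest =>
          have hlen' : rest.length ≤ fuel := by
            simpa [Nat.succ_le_succ_iff] using hlen
          by_cases hac : c = a
          · subst hac
            have hpre : List.isPrefixOf [c] (c :: rest) = true := by simp [List.isPrefixOf]
            simp only [PySem.Chars.replace.go, hpre, if_pos]
            rw [ih _ _ (by simpa using hlen')]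
            simp
          · have hpre : List.isPrefixOf [a] (c :: rest) = false := by
              simp [List.isPrefixOf]
              exact fun h => (hac h.symm).elim
            simp only [PySem.Chars.replace.go, hpre, Bool.false_eq_true, if_neg]
            rw [ih _ _ hlen']
            simp [hac]

theorem replace_single (l : List Char) (a b : Char) :
    PySem.Chars.replace l [a] [b] = l.map (fun c => if c == a then b else c) := by
  have h := replace_go_single a b l.length l [] (by omega)
  simpa [PySem.Chars.replace] using h

theorem splitOnP_map {α β : Type} (p : β → Bool) (f : α → β) (l : List α) :
    List.splitOnP p (l.map f) = (List.splitOnP (fun c => p (f c)) l).map (List.map f) := by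
  induction l with
  | nil => simp [List.splitOnP_nil]
  | cons c t ih =>
      by_cases hc : p (f c)
      · simp [List.splitOnP_cons, hc, ih]
      · obtain ⟨h0, r0, hsplit⟩ :=
          List.exists_cons_of_ne_nil (List.splitOnP_ne_nil (fun c => p (f c)) t)
        simp [List.splitOnP_cons, hc, ih, hsplit, List.modifyHead_cons]

theorem mem_splitOnP {α : Type} (p : α → Bool) (l : List α) (w : List α)
    (hw : w ∈ List.splitOnP p l) : ∀ c ∈ w, p c = false := by
  induction l generalizing w with
  | nil =>
      simp [List.splitOnP_nil] at hw
      subst hw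
      simp
  | cons c t ih =>
      by_cases hc : p c
      · rw [List.splitOnP_cons, if_pos hc] at hw
        rcases List.mem_cons.mp hw with h | h
        · subst h; simp
        · exact ih w h
      · obtain ⟨h0, r0, hsplit⟩ := List.exists_cons_of_ne_nil (List.splitOnP_ne_nil p t)
        rw [List.splitOnP_cons, if_neg (by simp [hc]), hsplit, List.modifyHead_cons] at hw
        rcases List.mem_cons.mp hw with h | h
        · subst h
          intro d hd
          rcases List.mem_cons.mp hd with h | h
          · subst h; exact (Bool.not_eq_true _).mp hc
          · exact ih h0 (by rw [hsplit]; exact List.mem_cons_self ..) d h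
        · exact ih w (by rw [hsplit]; exact List.mem_cons_of_mem _ h)

theorem flatMap_splitOnP {α : Type} (p q : α → Bool) (l : List α) :
    List.flatMap (List.splitOnP q) (List.splitOnP p l) =
      List.splitOnP (fun c => p c || q c) l := by
  induction l with
  | nil => simp [List.splitOnP_nil]
  | cons c t ih =>
      by_cases hp : p c
      · simp [List.splitOnP_cons, hp, ih]
      · obtain ⟨h0, r0, hsplit⟩ := List.exists_cons_of_ne_nil (List.splitOnP_ne_nil p t)
        by_cases hq : q c
        · rw [List.splitOnP_cons, if_neg (by simp [hp]), hsplit, List.modifyHead_cons]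
          rw [List.splitOnP_cons, if_pos (by simp [hp, hq])]
          rw [← ih, hsplit]
          simp [List.splitOnP_cons, hq]
        · obtain ⟨h1, r1, hsplit1⟩ := List.exists_cons_of_ne_nil (List.splitOnP_ne_nil q h0)
          rw [List.splitOnP_cons, if_neg (by simp [hp]), hsplit, List.modifyHead_cons]
          rw [List.splitOnP_cons, if_neg (by simp [hp, hq])]
          rw [← ih, hsplit]
          simp [List.splitOnP_cons, hq, hsplit1, List.modifyHead_cons]

theorem WS_nil (p : Char → Bool) : WS p [] = [] := by
  simp [WS, List.splitOnP_nil, List.filter]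

theorem WS_cons_delim (p : Char → Bool) (c : Char) (l : List Char) (h : p c = true) :
    WS p (c :: l) = WS p l := by
  simp [WS, List.splitOnP_cons, h, List.filter]

theorem splitOnP_shape (p : Char → Bool) (l : List Char) :
    ∃ r, List.splitOnP p l = l.takeWhile (fun c => !p c) :: r ∧
      r.filter (fun w => !w.isEmpty) = WS p (l.dropWhile (fun c => !p c)) := by
  induction l with
  | nil => exact ⟨[], by simp [List.splitOnP_nil], by simp [WS, List.splitOnP_nil, List.filter]⟩
  | cons c t ih =>
      by_cases hc : p c
      · refine ⟨List.splitOnP p t, ?_, ?_⟩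
        · simp [List.splitOnP_cons, hc]
        · rw [List.dropWhile_cons, if_neg (by simp [hc])]
          rw [WS_cons_delim p c t hc]
          rfl
      · obtain ⟨r, hr, hf⟩ := ih
        refine ⟨r, ?_, ?_⟩
        · simp [List.splitOnP_cons, hc, hr]
        · rw [List.dropWhile_cons, if_pos (by simp [hc])]
          exact hf

theorem WS_cons_nondelim (p : Char → Bool) (c : Char) (l : List Char) (h : p c = false) :
    WS p (c :: l) =
      (c :: l.takeWhile (fun d => !p d)) :: WS p (l.dropWhile (fun d => !p d)) := by
  obtain ⟨r, hr, hf⟩ := splitOnP_shape p l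
  rw [WS, List.splitOnP_cons, if_neg (by simp [h]), hr, List.modifyHead_cons]
  rw [List.filter_cons_of_pos (by simp)]
  rw [hf]

theorem WS_all_delim (p : Char → Bool) (l : List Char) (h : ∀ c ∈ l, p c = true) :
    WS p l = [] := by
  induction l with
  | nil => exact WS_nil p
  | cons c t ih =>
      rw [WS_cons_delim p c t (h c (List.mem_cons_self ..))]
      exact ih fun d hd => h d (List.mem_cons_of_mem _ hd)

theorem WS_append_delims (p : Char → Bool) (n : Nat) :
    ∀ (l post : List Char), l.length ≤ n → (∀ c ∈ post, p c = true) →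
      WS p (l ++ post) = WS p l := by
  induction n with
  | zero =>
      intro l post hlen hpost
      have hl : l = [] := List.eq_nil_of_length_eq_zero (Nat.le_zero.mp hlen)
      subst hl
      rw [List.nil_append, WS_nil, WS_all_delim p post hpost]
  | succ n ih =>
      intro l post hlen hpost
      cases l with
      | nil => rw [List.nil_append, WS_nil, WS_all_delim p post hpost]
      | cons c t =>
          have hlen' : t.length ≤ n := by simpa [Nat.succ_le_succ_iff] using hlen
          by_cases hc : p c
          · rw [List.cons_append, WS_cons_delim p c _ hc, WS_cons_delim p c t hc]
            exact ih t post hlen' hpost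
          · have hc' : p c = false := (Bool.not_eq_true _).mp hc
            rw [List.cons_append, WS_cons_nondelim p c _ hc', WS_cons_nondelim p c t hc']
            have hpostTake : List.takeWhile (fun d => !p d) post = [] := by
              cases post with
              | nil => rfl
              | cons q qs =>
                  rw [List.takeWhile_cons, if_neg (by simp [hpost q (List.mem_cons_self ..)])]
            by_cases hall : (List.dropWhile (fun d => !p d) t).isEmpty
            · have hdrop : List.dropWhile (fun d => !p d) t = [] := List.isEmpty_iff.mp hall
              have htake : List.takeWhile (fun d => !p d) t = t := by
                have := List.takeWhile_append_dropWhile (p := fun d => !p d) (l := t)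
                rwa [hdrop, List.append_nil] at this
              have hdropPost : List.dropWhile (fun d => !p d) post = post := by
                cases post with
                | nil => rfl
                | cons q qs =>
                    rw [List.dropWhile_cons, if_neg (by simp [hpost q (List.mem_cons_self ..)])]
              rw [List.takeWhile_append, if_pos (by rw [htake]), List.dropWhile_append,
                if_pos (by rw [hdrop]; rfl)]
              rw [htake, hdrop, hpostTake, hdropPost, WS_nil, WS_all_delim p post hpost,
                List.append_nil]
            · have hne : (List.dropWhile (fun d => !p d) t).length ≠ t.length → True := fun _ => trivial
              have htake : List.takeWhile (fun d => !p d) (t ++ post) =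
                  List.takeWhile (fun d => !p d) t := by
                rw [List.takeWhile_append, if_neg]
                intro hlen''
                apply hall
                have hsum := congrArg List.length (List.takeWhile_append_dropWhile
                  (p := fun d => !p d) (l := t))
                rw [List.length_append, hlen''] at hsum
                have : (List.dropWhile (fun d => !p d) t).length = 0 := by omega
                simpa [List.isEmpty_iff, List.length_eq_zero_iff] using this
              have hdrop : List.dropWhile (fun d => !p d) (t ++ post) =
                  List.dropWhile (fun d => !p d) t ++ post := by
                rw [List.dropWhile_append, if_neg (by simp [hall])]
              rw [htake, hdrop]
              have : (List.dropWhile (fun d => !p d) t).length ≤ n :=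
                le_trans (List.length_dropWhile_le _ _) hlen'
              rw [ih _ post this hpost]

theorem WS_strip (l : List Char) :
    WS PySem.Chars.isspace (PySem.Chars.strip l) = WS PySem.Chars.isspace l := by
  have hlstrip : ∀ (x : List Char),
      WS PySem.Chars.isspace (PySem.Chars.lstrip x) = WS PySem.Chars.isspace x := by
    intro x
    induction x with
    | nil => rfl
    | cons c t ih =>
        by_cases hc : PySem.Chars.isspace c
        · rw [PySem.Chars.lstrip, List.dropWhile_cons, if_pos hc, WS_cons_delim _ c t hc]
          exact ih
        · rw [PySem.Chars.lstrip, List.dropWhile_cons, if_neg hc]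
  have hrstrip : ∀ (y : List Char),
      WS PySem.Chars.isspace (PySem.Chars.rstrip y) = WS PySem.Chars.isspace y := by
    intro y
    have hdecomp : PySem.Chars.rstrip y ++
        (List.takeWhile PySem.Chars.isspace y.reverse).reverse = y := by
      rw [PySem.Chars.rstrip, ← List.reverse_append, List.takeWhile_append_dropWhile,
        List.reverse_reverse]
    have hpost : ∀ c ∈ (List.takeWhile PySem.Chars.isspace y.reverse).reverse,
        PySem.Chars.isspace c = true := by
      intro c hc
      exact List.mem_takeWhile_imp (List.mem_reverse.mp hc)
    calc WS PySem.Chars.isspace (PySem.Chars.rstrip y)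
        = WS PySem.Chars.isspace (PySem.Chars.rstrip y ++
            (List.takeWhile PySem.Chars.isspace y.reverse).reverse) :=
          (WS_append_delims PySem.Chars.isspace (PySem.Chars.rstrip y).length
            (PySem.Chars.rstrip y) _ (le_refl _) hpost).symm
      _ = WS PySem.Chars.isspace y := by rw [hdecomp]
  rw [PySem.Chars.strip, hrstrip, hlstrip]

theorem mem_WS (p : Char → Bool) (l w : List Char) (hw : w ∈ WS p l) :
    w.isEmpty = false ∧ ∀ c ∈ w, p c = false := by
  rw [WS, List.mem_filter] at hw
  exact ⟨by simpa using hw.2, mem_splitOnP p l w hw.1⟩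

theorem strip_no_space (w : List Char) (h : ∀ c ∈ w, PySem.Chars.isspace c = false) :
    PySem.Chars.strip w = w := by
  have hl : PySem.Chars.lstrip w = w := by
    cases w with
    | nil => rfl
    | cons c t =>
        rw [PySem.Chars.lstrip, List.dropWhile_cons, if_neg (by simp [h c (List.mem_cons_self ..)])]
  rw [PySem.Chars.strip, hl, PySem.Chars.rstrip]
  cases hrev : w.reverse with
  | nil => simpa using congrArg List.reverse hrev
  | cons c t =>
      have hc : c ∈ w := List.mem_reverse.mp (by rw [hrev]; exact List.mem_cons_self ..)
      rw [List.dropWhile_cons, if_neg (by simp [h c hc]), ← hrev, List.reverse_reverse]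

-- A's per-part contribution equals the whitespace tokens of the raw part.
theorem part_contrib (part : List Char) :
    (if (PySem.Chars.strip part).isEmpty then []
     else ((PySem.Chars.split₀ (PySem.Chars.strip part)).filter
             (fun p => !(PySem.Chars.strip p).isEmpty)).map PySem.Chars.strip) =
      WS PySem.Chars.isspace part := by
  by_cases h : (PySem.Chars.strip part).isEmpty
  · rw [if_pos h, ← WS_strip part, List.isEmpty_iff.mp h, WS_nil]
  · rw [if_neg h, split0_eq_WS, WS_strip]
    have hkeep : ∀ w ∈ WS PySem.Chars.isspace part,
        (fun p => !(PySem.Chars.strip p).isEmpty) w = true := by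
      intro w hw
      obtain ⟨hne, hns⟩ := mem_WS _ _ _ hw
      simp [strip_no_space w hns, hne]
    rw [List.filter_eq_self.mpr hkeep]
    calc (WS PySem.Chars.isspace part).map PySem.Chars.strip
        = (WS PySem.Chars.isspace part).map id := by
          apply List.map_congr_left
          intro w hw
          exact strip_no_space w (mem_WS _ _ _ hw).2
      _ = WS PySem.Chars.isspace part := List.map_id _

theorem filter_splitOnP_map (f : Char → Char) (p : Char → Bool) (cs : List Char)
    (hf : ∀ c, p (f c) = false → f c = c) :
    (List.splitOnP p (cs.map f)).filter (fun w => !w.isEmpty) =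
      (List.splitOnP (fun c => p (f c)) cs).filter (fun w => !w.isEmpty) := by
  rw [splitOnP_map]
  have hfix : ∀ w ∈ List.splitOnP (fun c => p (f c)) cs, w.map f = w := by
    intro w hw
    calc w.map f = w.map id :=
          List.map_congr_left (fun c hc => hf c (mem_splitOnP _ _ _ hw c hc))
      _ = w := List.map_id _
  rw [show (List.splitOnP (fun c => p (f c)) cs).map (List.map f) =
      List.splitOnP (fun c => p (f c)) cs from by
    calc (List.splitOnP (fun c => p (f c)) cs).map (List.map f)
        = (List.splitOnP (fun c => p (f c)) cs).map id := List.map_congr_left hfix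
      _ = _ := List.map_id _]

-- the central token-list equality, on character lists
theorem main_chars (cs : List Char) :
    (PySem.Chars.splitOn (PySem.Chars.replace cs [';'] [',']) [',']).foldl
      (fun tokens part =>
        let part := PySem.Chars.strip part
        if part.isEmpty then tokens
        else tokens ++ ((PySem.Chars.split₀ part).filter
              (fun p => !(PySem.Chars.strip p).isEmpty)).map PySem.Chars.strip)
      [] =
    PySem.Chars.split₀
      (PySem.Chars.replace (PySem.Chars.replace cs [';'] [' ']) [','] [' ']) := by
  have hbody_eq : (fun (tokens : List (List Char)) (part : List Char) =>
        let part := PySem.Chars.strip part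
        if part.isEmpty then tokens
        else tokens ++ ((PySem.Chars.split₀ part).filter
              (fun p => !(PySem.Chars.strip p).isEmpty)).map PySem.Chars.strip) =
      fun tokens part => tokens ++
        (if (PySem.Chars.strip part).isEmpty then []
         else ((PySem.Chars.split₀ (PySem.Chars.strip part)).filter
                 (fun p => !(PySem.Chars.strip p).isEmpty)).map PySem.Chars.strip) := by
    funext tokens part
    by_cases h : (PySem.Chars.strip part).isEmpty <;> simp [h]
  have hflat_eq : (fun part =>
        if (PySem.Chars.strip part).isEmpty then []
        else ((PySem.Chars.split₀ (PySem.Chars.strip part)).filter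
                (fun p => !(PySem.Chars.strip p).isEmpty)).map PySem.Chars.strip) =
      WS PySem.Chars.isspace := funext part_contrib
  rw [hbody_eq, PySem.List.foldl_append_eq_flatMap, List.nil_append]
  rw [hflat_eq]
  rw [replace_single, splitOn_single]
  rw [split0_eq_WS, replace_single, replace_single, List.map_map]
  unfold WS
  rw [← List.filter_flatMap, flatMap_splitOnP]
  rw [filter_splitOnP_map (fun c => if c == ';' then ',' else c)
    (fun c => (c == ',' || PySem.Chars.isspace c)) cs ?hf1]
  case hf1 =>
    intro c h
    by_cases hc : c = ';'
    · subst hc; exact absurd h (by decide)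
    · simp [beq_iff_eq, hc]
  rw [filter_splitOnP_map
    ((fun c => if c == ',' then ' ' else c) ∘ fun c => if c == ';' then ' ' else c)
    PySem.Chars.isspace cs ?hf2]
  case hf2 =>
    intro c h
    by_cases hc : c = ';'
    · subst hc; exact absurd h (by decide)
    · by_cases hc2 : c = ','
      · subst hc2; exact absurd h (by decide)
      · simp [Function.comp, beq_iff_eq, hc, hc2]
  congr 2
  funext c
  by_cases hc : c = ';'
  · subst hc; decide
  · by_cases hc2 : c = ','
    · subst hc2; decide
    · simp [Function.comp, beq_iff_eq, hc, hc2]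

-- ===== VERDICT (by name: the statement is the Claim_ definition above) =====
theorem choices_from_input_py_spec : Claim_equal_choices_from_input_py := by
  intro s _
  show _ = _
  unfold choices_from_input_py choices_from_input_py_alt
  rw [main_chars]
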